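-- pv_equiv track=rewrite | github.com/T9404/EGE | Python/ЕГЭ2021;2022/14/kompege/256.py | f
-- ===== SOURCE A (Python) =====
-- def f(x):
--     x_6 = ''
--     x_5 = ''
--     y = x
--     while x:
--         x_6 += str(x % 6)
--         x //= 6
--     while y:
--         x_5 += str(y % 5)
--         y //= 5
--     if len(x_6) == 2 and len(x_5) == 3:
--         return True
--     else: return False
-- ===== SOURCE B (Python) =====
-- def f(x):
--     # x has exactly 2 digits in base 6 iff 6 <= x <= 35, and exactly 3 digits
--     # in base 5 iff 25 <= x <= 124; the intersection is the closed range below.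
--     return 25 <= x <= 35
-- ===== Notes on version B (the rewrite author's own statement) =====
-- stated objective: simpler
-- what changed: Replaced the two digit-extraction loops (repeated floor division and string building) by a single closed-form range check 25 <= x <= 35, the intersection of the two-digit base-6 range [6,35] and the three-digit base-5 range [25,124].
import Mathlib
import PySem

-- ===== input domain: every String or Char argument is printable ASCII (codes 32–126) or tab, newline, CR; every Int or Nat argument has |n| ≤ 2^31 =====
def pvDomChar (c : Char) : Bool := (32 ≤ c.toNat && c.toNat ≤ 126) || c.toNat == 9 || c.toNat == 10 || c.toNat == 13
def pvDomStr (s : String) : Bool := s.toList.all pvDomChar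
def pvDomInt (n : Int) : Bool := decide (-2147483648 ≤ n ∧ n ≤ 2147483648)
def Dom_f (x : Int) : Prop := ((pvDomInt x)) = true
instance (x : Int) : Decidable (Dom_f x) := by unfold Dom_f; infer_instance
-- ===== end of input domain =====

-- B replaces A's two digit-extraction loops by the closed-form range check 25 ≤ x ≤ 35 (simpler, same result on Pre_).

-- ===== PORT A =====
-- the 'while x:' loop: append str(x % b), then x //= b; fuel only makes the
-- recursion total (64 steps are more than enough for |x| ≤ 2^31 with b ≥ 5)
def fLoop (b : Int) (x : Int) (acc : String) : Nat → String
  | 0 => acc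
  | fuel + 1 =>
    if x = 0 then acc
    else fLoop b (PySem.Int.floordiv x b) (acc ++ PySem.Int.toStr (PySem.Int.mod x b)) fuel

def f (x : Int) : Bool :=
  let x6 := fLoop 6 x "" 64
  let x5 := fLoop 5 x "" 64
  if PySem.Str.len x6 = 2 ∧ PySem.Str.len x5 = 3 then true else false

-- ===== PORT B =====
def f_alt (x : Int) : Bool := decide (25 ≤ x ∧ x ≤ 35)

-- ===== PRECONDITION & SPEC =====
-- Pre_ excludes negative x, on which A's 'while x:' loops forever (x //= 6 stays at -1), so A never returns there.
def Pre_f (x : Int) : Prop := 0 ≤ x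
instance (x : Int) : Decidable (Pre_f x) := by unfold Pre_f; infer_instance
def pvWitness_f : Int := 30

def Spec_f (x : Int) (out : Bool) : Prop := out = f_alt x
instance (x : Int) (out : Bool) : Decidable (Spec_f x out) := by unfold Spec_f; infer_instance

-- ===== CLAIM (what is proved, stated in full; the proofs are below) =====
def Claim_equal_f : Prop := ∀ (x : Int), Dom_f x → Pre_f x → Spec_f x (f x)

-- ===== LEMMAS AND PROOFS =====

-- pure iteration count of the while loop (how many divisions until x hits 0)
def cd (b : Int) (x : Int) : Nat → Nat
  | 0 => 0
  | fuel + 1 => if x = 0 then 0 else cd b (PySem.Int.floordiv x b) fuel + 1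

theorem toChars_digit_len (d : Int) (h0 : 0 ≤ d) (h9 : d ≤ 9) :
    (PySem.Int.toChars d).length = 1 := by
  interval_cases d <;> decide

theorem fLoop_len (fuel : Nat) : ∀ (b x : Int) (acc : String), 0 < b → b ≤ 10 → 0 ≤ x →
    (fLoop b x acc fuel).toList.length = acc.toList.length + cd b x fuel := by
  induction fuel with
  | zero => intro b x acc _ _ _; simp [fLoop, cd]
  | succ n ih =>
    intro b x acc hb hb10 hx
    by_cases h0 : x = 0
    · simp [fLoop, cd, h0]
    · have hmod0 : 0 ≤ PySem.Int.mod x b := PySem.Int.mod_nonneg x hb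
      have hmodlt : PySem.Int.mod x b < b := PySem.Int.mod_lt x hb
      have hdiv : 0 ≤ PySem.Int.floordiv x b := by
        rw [PySem.Int.floordiv_eq_ediv_of_pos hb]; exact Int.ediv_nonneg hx (le_of_lt hb)
      rw [fLoop, cd, if_neg h0, if_neg h0, ih b _ _ hb hb10 hdiv]
      have hone : (acc ++ PySem.Int.toStr (PySem.Int.mod x b)).toList.length
          = acc.toList.length + 1 := by
        rw [String.toList_append, List.length_append, PySem.Int.toList_toStr,
          toChars_digit_len _ hmod0 (by omega)]
      omega

theorem cd_eq_zero_iff (b x : Int) (fuel : Nat) : cd b x (fuel + 1) = 0 ↔ x = 0 := by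
  by_cases h : x = 0 <;> simp [cd, h]

theorem cd6_eq_two (x : Int) (hx : 0 ≤ x) :
    cd 6 x 64 = 2 ↔ 6 ≤ x ∧ x ≤ 35 := by
  by_cases h0 : x = 0
  · subst h0; simp [cd]
  · rw [show (64 : Nat) = 63 + 1 from rfl, cd, if_neg h0,
      PySem.Int.floordiv_eq_ediv_of_pos (show (0:Int) < 6 by norm_num)]
    set y := x / 6 with hy
    by_cases h1 : y = 0
    · rw [show (63 : Nat) = 62 + 1 from rfl, cd, if_pos h1]
      omega
    · rw [show (63 : Nat) = 62 + 1 from rfl, cd, if_neg h1,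
        PySem.Int.floordiv_eq_ediv_of_pos (show (0:Int) < 6 by norm_num)]
      have h2 : cd 6 (y / 6) 62 = 0 ↔ y / 6 = 0 := cd_eq_zero_iff 6 (y / 6) 61
      constructor
      · intro h
        have := h2.mp (by omega)
        omega
      · intro h
        have := h2.mpr (show y / 6 = 0 by omega)
        omega

theorem cd5_eq_three (x : Int) (hx : 0 ≤ x) :
    cd 5 x 64 = 3 ↔ 25 ≤ x ∧ x ≤ 124 := by
  by_cases h0 : x = 0
  · subst h0; simp [cd]
  · rw [show (64 : Nat) = 63 + 1 from rfl, cd, if_neg h0,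
      PySem.Int.floordiv_eq_ediv_of_pos (show (0:Int) < 5 by norm_num)]
    set y := x / 5 with hy
    by_cases h1 : y = 0
    · rw [show (63 : Nat) = 62 + 1 from rfl, cd, if_pos h1]
      omega
    · rw [show (63 : Nat) = 62 + 1 from rfl, cd, if_neg h1,
        PySem.Int.floordiv_eq_ediv_of_pos (show (0:Int) < 5 by norm_num)]
      set z := y / 5 with hz
      by_cases h2 : z = 0
      · rw [show (62 : Nat) = 61 + 1 from rfl, cd, if_pos h2]
        omega
      · rw [show (62 : Nat) = 61 + 1 from rfl, cd, if_neg h2,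
          PySem.Int.floordiv_eq_ediv_of_pos (show (0:Int) < 5 by norm_num)]
        have h3 : cd 5 (z / 5) 61 = 0 ↔ z / 5 = 0 := cd_eq_zero_iff 5 (z / 5) 60
        constructor
        · intro h
          have := h3.mp (by omega)
          omega
        · intro h
          have := h3.mpr (show z / 5 = 0 by omega)
          omega

-- ===== VERDICT (by name: the statement is the Claim_ definition above) =====
theorem f_spec : Claim_equal_f := by
  intro x hdom hpre
  have hx : 0 ≤ x := hpre
  unfold Spec_f f f_alt
  have l6 := fLoop_len 64 6 x "" (by norm_num) (by norm_num) hx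
  have l5 := fLoop_len 64 5 x "" (by norm_num) (by norm_num) hx
  have hz : "".toList.length = 0 := rfl
  rw [hz] at l6 l5
  have h6 := cd6_eq_two x hx
  have h5 := cd5_eq_three x hx
  simp only [PySem.Str.len_eq, l6, l5]
  by_cases hm : 25 ≤ x ∧ x ≤ 35
  · have e6 : cd 6 x 64 = 2 := h6.mpr ⟨by omega, by omega⟩
    have e5 : cd 5 x 64 = 3 := h5.mpr ⟨by omega, by omega⟩
    rw [if_pos ⟨by omega, by omega⟩, decide_eq_true hm]
  · rw [if_neg, decide_eq_false hm]
    intro ⟨a6, a5⟩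
    have e6 : cd 6 x 64 = 2 := by omega
    have e5 : cd 5 x 64 = 3 := by omega
    exact hm ⟨(h5.mp e5).1, (h6.mp e6).2⟩
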